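-- pv_equiv track=rewrite | github.com/Nino-Zh/Capstone-Profile-Aligner | align_and_score.py | score_mutation_tables
-- ===== SOURCE A (Python) =====
-- def score_mutation_tables(algo_table, true_table, is_table2=False):
--     """
--     Compare mutation tables (Table 1 or Table 2) and calculate the score.
--
--     Args:
--         algo_table: Algorithm-generated mutation data
--         true_table: Ground-truth mutation data
--         is_table2: If True, only compare insertions (ignores substitutions/no mutations)
--
--     Returns:
--         Score (int)
--     """
--     # Convert tables to dictionaries: {base_idx: (mutation_type, info)}
--     algo_dict = {entry[0]: (entry[1], entry[2]) for entry in algo_table}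
--     true_dict = {entry[0]: (entry[1], entry[2]) for entry in true_table}
--
--     # All indices (union of algo and truth indices)
--     all_indices = set(algo_dict.keys()).union(true_dict.keys())
--     score = 0
--
--     for idx in all_indices:
--         algo_entry = algo_dict.get(idx, None)
--         true_entry = true_dict.get(idx, None)
--
--         # Skip if comparing Table 2 and mutation is not an insertion
--         if is_table2:
--             if algo_entry and algo_entry[0] != "Insertion":
--                 algo_entry = None  # Treat as non-existent for scoring
--             if true_entry and true_entry[0] != "Insertion":
--                 true_entry = None
--
--         # Case 1: Both entries exist
--         if algo_entry and true_entry: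
--             if algo_entry == true_entry:
--                 score += 1  # Correct match
--             else:
--                 score -= 1  # Mismatch
--         # Case 2: Missing entry in one of the tables
--         elif algo_entry != true_entry:
--             score -= 1  # Penalize missing/mismatched entries
--
--     return score
-- ===== SOURCE B (Python) =====
-- def score_mutation_tables(algo_table, true_table, is_table2=False):
--     algo_dict = {entry[0]: (entry[1], entry[2]) for entry in algo_table}
--     true_dict = {entry[0]: (entry[1], entry[2]) for entry in true_table}
--     if is_table2:
--         algo_dict = {k: v for k, v in algo_dict.items() if v[0] == "Insertion"}
--         true_dict = {k: v for k, v in true_dict.items() if v[0] == "Insertion"}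
--     matches = sum(1 for k, v in algo_dict.items() if true_dict.get(k) == v)
--     union = len(algo_dict.keys() | true_dict.keys())
--     return 2 * matches - union
-- ===== Notes on version B (the rewrite author's own statement) =====
-- stated objective: simpler
-- what changed: Replaces A's per-index +1/0/-1 case-analysis loop over the key union (with per-key entry nullification for table 2) by filtering both dicts up front and returning the closed form 2*matches - |key union|.
import Mathlib
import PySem

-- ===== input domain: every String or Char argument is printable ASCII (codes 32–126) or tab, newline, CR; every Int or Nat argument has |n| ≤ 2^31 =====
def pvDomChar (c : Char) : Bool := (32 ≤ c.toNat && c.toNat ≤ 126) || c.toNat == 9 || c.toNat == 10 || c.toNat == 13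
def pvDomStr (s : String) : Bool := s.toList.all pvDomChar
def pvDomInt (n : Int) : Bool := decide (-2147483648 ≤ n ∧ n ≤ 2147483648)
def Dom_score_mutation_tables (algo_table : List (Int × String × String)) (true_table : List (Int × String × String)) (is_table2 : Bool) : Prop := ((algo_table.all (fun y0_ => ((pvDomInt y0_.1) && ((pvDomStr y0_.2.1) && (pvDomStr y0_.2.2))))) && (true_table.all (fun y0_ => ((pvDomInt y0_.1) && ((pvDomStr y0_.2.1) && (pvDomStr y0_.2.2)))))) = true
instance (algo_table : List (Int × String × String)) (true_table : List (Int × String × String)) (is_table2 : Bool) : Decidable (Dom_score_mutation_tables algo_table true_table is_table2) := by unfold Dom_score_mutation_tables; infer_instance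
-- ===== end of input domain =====

-- B replaces A's per-index +1/0/-1 loop over the key union by the closed form
-- 2*matches - |union| over the (Insertion-)filtered dicts; objective: simpler, same cost.

-- ===== PORT A =====
-- Python tuples are non-empty, hence always truthy: 'if algo_entry and true_entry'
-- tests exactly "both are not None". The loop over the set is a pure sum, so it is
-- independent of Python's set iteration order.
def score_mutation_tables (algo_table : List (Int × String × String)) (true_table : List (Int × String × String)) (is_table2 : Bool) : Int :=
  let algo_dict : PySem.Dict Int (String × String) :=
    algo_table.foldl (fun d entry => d.insert entry.1 (entry.2.1, entry.2.2)) PySem.Dict.empty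
  let true_dict : PySem.Dict Int (String × String) :=
    true_table.foldl (fun d entry => d.insert entry.1 (entry.2.1, entry.2.2)) PySem.Dict.empty
  let all_indices : PySem.Set Int :=
    PySem.Set.union (PySem.Set.ofList algo_dict.keys) true_dict.keys
  all_indices.foldl (fun score idx =>
    let algo_entry := algo_dict.get? idx
    let true_entry := true_dict.get? idx
    let algo_entry := if is_table2 then
        (match algo_entry with
         | some v => if v.1 ≠ "Insertion" then none else some v
         | none => none)
      else algo_entry
    let true_entry := if is_table2 then
        (match true_entry with
         | some v => if v.1 ≠ "Insertion" then none else some v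
         | none => none)
      else true_entry
    match algo_entry, true_entry with
    | some a, some t => if a = t then score + 1 else score - 1
    | none, none => score
    | _, _ => score - 1) 0

-- ===== PORT B =====
def score_mutation_tables_alt (algo_table : List (Int × String × String)) (true_table : List (Int × String × String)) (is_table2 : Bool) : Int :=
  let algo_dict : PySem.Dict Int (String × String) :=
    algo_table.foldl (fun d entry => d.insert entry.1 (entry.2.1, entry.2.2)) PySem.Dict.empty
  let true_dict : PySem.Dict Int (String × String) :=
    true_table.foldl (fun d entry => d.insert entry.1 (entry.2.1, entry.2.2)) PySem.Dict.empty
  let algo_dict := if is_table2 then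
      PySem.Dict.mk (algo_dict.items.filter (fun kv => kv.2.1 == "Insertion")) else algo_dict
  let true_dict := if is_table2 then
      PySem.Dict.mk (true_dict.items.filter (fun kv => kv.2.1 == "Insertion")) else true_dict
  let matched : Int :=
    ((algo_dict.items.filter (fun kv => true_dict.get? kv.1 == some kv.2)).length : Int)
  let union : Int :=
    PySem.Set.len (PySem.Set.union (PySem.Set.ofList algo_dict.keys) true_dict.keys)
  2 * matched - union

-- ===== PRECONDITION & SPEC =====
def Spec_score_mutation_tables (algo_table : List (Int × String × String)) (true_table : List (Int × String × String)) (is_table2 : Bool) (out : Int) : Prop := out = score_mutation_tables_alt algo_table true_table is_table2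
instance (algo_table : List (Int × String × String)) (true_table : List (Int × String × String)) (is_table2 : Bool) (out : Int) : Decidable (Spec_score_mutation_tables algo_table true_table is_table2 out) := by unfold Spec_score_mutation_tables; infer_instance

-- ===== CLAIM (what is proved, stated in full; the proofs are below) =====
def Claim_equal_score_mutation_tables : Prop := ∀ (algo_table : List (Int × String × String)) (true_table : List (Int × String × String)) (is_table2 : Bool), Dom_score_mutation_tables algo_table true_table is_table2 → Spec_score_mutation_tables algo_table true_table is_table2 (score_mutation_tables algo_table true_table is_table2)

-- ===== LEMMAS AND PROOFS =====

-- keys of a filtered literal dict stay nodup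
theorem pv_nodup_keys_filter (l : List (Int × (String × String))) (p : Int × (String × String) → Bool)
    (h : (l.map Prod.fst).Nodup) : ((l.filter p).map Prod.fst).Nodup :=
  h.sublist (List.Sublist.map Prod.fst List.filter_sublist)

-- lookup in a value-filtered dict = Option.filter of the lookup
theorem pv_get?_mk_filter (l : List (Int × (String × String))) (q : (String × String) → Bool)
    (h : (l.map Prod.fst).Nodup) (k : Int) :
    (PySem.Dict.mk (l.filter (fun kv => q kv.2))).get? k =
      ((PySem.Dict.mk l).get? k).filter q := by
  induction l with
  | nil => rfl
  | cons hd tl ih =>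
    obtain ⟨a, v⟩ := hd
    rw [List.map_cons, List.nodup_cons] at h
    obtain ⟨hhd, htl⟩ := h
    by_cases hk : a = k
    · subst hk
      by_cases hq : q v
      · simp [hq, PySem.Dict.get?_mk_cons, Option.filter]
      · have hnone : (PySem.Dict.mk (tl.filter (fun kv => q kv.2))).get? a = none := by
          rw [PySem.Dict.get?_eq_none_iff_not_mem_keys]
          intro hmem
          exact hhd (List.Sublist.mem hmem (List.Sublist.map Prod.fst List.filter_sublist))
        simp [hq, PySem.Dict.get?_mk_cons, Option.filter, hnone]
    · by_cases hq : q v <;>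
        simp [hq, PySem.Dict.get?_mk_cons, hk, ih htl]

-- A's is_table2 transformation of a looked-up entry IS Option.filter
theorem pv_transform_eq_filter (o : Option (String × String)) :
    (match o with
     | some v => if v.1 ≠ "Insertion" then none else some v
     | none => none) = o.filter (fun v => v.1 == "Insertion") := by
  cases o with
  | none => rfl
  | some v => by_cases hv : v.1 = "Insertion" <;> simp [Option.filter, hv]

-- a sum of 2*indicator - indicator is 2*count - count
theorem pv_sum_two_ind (U : List Int) (p q : Int → Bool) :
    (U.map (fun k => 2 * (if p k then (1:Int) else 0) - (if q k then 1 else 0))).sum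
      = 2 * (U.countP p : Int) - (U.countP q : Int) := by
  induction U with
  | nil => simp
  | cons u tl ih =>
    simp only [List.map_cons, List.sum_cons, List.countP_cons, ih]
    by_cases hp : p u <;> by_cases hq : q u <;> simp [hp, hq] <;> push_cast <;> try ring

-- count over a nodup superlist = length of a nodup list characterised by the predicate
theorem pv_countP_eq_length (U V : List Int) (p : Int → Bool) (hU : U.Nodup) (hV : V.Nodup)
    (hmem : ∀ k, k ∈ V ↔ k ∈ U ∧ p k) : (U.countP p : Int) = (V.length : Int) := by
  rw [List.countP_eq_length_filter]
  congr 1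
  exact (List.perm_ext_iff_of_nodup (hU.filter p) hV |>.mpr
    (by intro a; rw [List.mem_filter, hmem])).length_eq

-- the core identity: A's per-key loop over any nodup cover U equals 2*matches - |union|
theorem pv_core (A B : PySem.Dict Int (String × String)) (hA : A.keys.Nodup) (_hB : B.keys.Nodup)
    (U : List Int) (hU : U.Nodup)
    (hcovA : ∀ k, k ∈ A.keys → k ∈ U) (hcovB : ∀ k, k ∈ B.keys → k ∈ U) :
    U.foldl (fun score idx =>
      match A.get? idx, B.get? idx with
      | some a, some t => if a = t then score + 1 else score - 1
      | none, none => score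
      | _, _ => score - 1) 0
    = 2 * ((A.items.filter (fun kv => B.get? kv.1 == some kv.2)).length : Int)
      - PySem.Set.len (PySem.Set.union (PySem.Set.ofList A.keys) B.keys) := by
  have hbody : (fun (score : Int) (idx : Int) =>
      match A.get? idx, B.get? idx with
      | some a, some t => if a = t then score + 1 else score - 1
      | none, none => score
      | _, _ => score - 1)
    = (fun score idx => score +
        (2 * (if (match A.get? idx with
                   | some a => B.get? idx == some a
                   | none => false) then (1:Int) else 0)
         - (if ((A.get? idx).isSome || (B.get? idx).isSome) then 1 else 0))) := by
    funext s k
    rcases ha : A.get? k with _ | a <;> rcases hb : B.get? k with _ | t <;> simp [ha, hb]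
    · ring
    · ring
    · by_cases h : a = t
      · subst h; simp
      · have ht : ¬ t = a := fun hh => h hh.symm
        simp [h, ht]
        ring
  rw [hbody, PySem.List.foldl_add, pv_sum_two_ind, zero_add]
  have hmatch : (U.countP (fun idx => match A.get? idx with
      | some a => B.get? idx == some a
      | none => false) : Int)
      = ((A.items.filter (fun kv => B.get? kv.1 == some kv.2)).map Prod.fst).length := by
    apply pv_countP_eq_length _ _ _ hU
    · exact pv_nodup_keys_filter A.items _ hA
    · intro k
      simp only [List.mem_map, List.mem_filter]
      constructor
      · rintro ⟨⟨k', v⟩, ⟨hin, hbeq⟩, rfl⟩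
        have := (PySem.Dict.get?_eq_some_iff_mem_items A k' v hA).mpr hin
        refine ⟨hcovA k' (PySem.Dict.mem_keys_of_mem_items A hin), ?_⟩
        simp only [this]
        exact hbeq
      · rintro ⟨hkU, hp⟩
        rcases ha : A.get? k with _ | v
        · simp [ha] at hp
        · exact ⟨(k, v), ⟨(PySem.Dict.get?_eq_some_iff_mem_items A k v hA).mp ha,
            by simpa [ha] using hp⟩, rfl⟩
  have hunion : (U.countP (fun idx => (A.get? idx).isSome || (B.get? idx).isSome) : Int)
      = ((PySem.Set.union (PySem.Set.ofList A.keys) B.keys).length : Int) := by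
    apply pv_countP_eq_length _ _ _ hU
    · exact PySem.Set.nodup_union _ _ (PySem.Set.nodup_ofList _)
    · intro k
      rw [PySem.Set.mem_union, PySem.Set.mem_ofList]
      have ha : (A.get? k).isSome = true ↔ k ∈ A.keys := by
        rw [Option.isSome_iff_ne_none, ne_eq, PySem.Dict.get?_eq_none_iff_not_mem_keys]
        exact not_not
      have hb : (B.get? k).isSome = true ↔ k ∈ B.keys := by
        rw [Option.isSome_iff_ne_none, ne_eq, PySem.Dict.get?_eq_none_iff_not_mem_keys]
        exact not_not
      constructor
      · rintro (hk | hk)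
        · exact ⟨hcovA k hk, by simp [ha.mpr hk]⟩
        · exact ⟨hcovB k hk, by simp [hb.mpr hk]⟩
      · rintro ⟨-, hp⟩
        rcases Bool.or_eq_true_iff.mp hp with h | h
        · exact Or.inl (ha.mp h)
        · exact Or.inr (hb.mp h)
  rw [hmatch, hunion]
  simp [PySem.Set.len]

-- ===== VERDICT (by name: the statement is the Claim_ definition above) =====
theorem score_mutation_tables_spec : Claim_equal_score_mutation_tables := by
  intro algo_table true_table is_table2 _
  unfold Spec_score_mutation_tables
  simp only [score_mutation_tables, score_mutation_tables_alt]
  set da := algo_table.foldl (fun d entry => d.insert entry.1 (entry.2.1, entry.2.2))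
      PySem.Dict.empty with hda
  set dt := true_table.foldl (fun d entry => d.insert entry.1 (entry.2.1, entry.2.2))
      PySem.Dict.empty with hdt
  have hnda : da.keys.Nodup := by
    rw [hda]
    exact PySem.Dict.nodup_keys_foldl_insert_key _ _ _ _ PySem.Dict.nodup_keys_empty
  have hndt : dt.keys.Nodup := by
    rw [hdt]
    exact PySem.Dict.nodup_keys_foldl_insert_key _ _ _ _ PySem.Dict.nodup_keys_empty
  cases is_table2 with
  | false =>
    simp only [Bool.false_eq_true, if_false]
    exact (pv_core da dt hnda hndt _
      (PySem.Set.nodup_union _ _ (PySem.Set.nodup_ofList _))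
      (fun k hk => (PySem.Set.mem_union _ _ k).mpr (Or.inl ((PySem.Set.mem_ofList _ _).mpr hk)))
      (fun k hk => (PySem.Set.mem_union _ _ k).mpr (Or.inr hk)))
  | true =>
    simp only [if_true]
    set fa := PySem.Dict.mk (da.items.filter (fun kv => kv.2.1 == "Insertion")) with hfa
    set ft := PySem.Dict.mk (dt.items.filter (fun kv => kv.2.1 == "Insertion")) with hft
    have hkeys_da : da.keys = da.items.map Prod.fst := rfl
    have hkeys_dt : dt.keys = dt.items.map Prod.fst := rfl
    have hnfa : fa.keys.Nodup := by
      rw [hfa]; exact pv_nodup_keys_filter da.items _ (by rwa [hkeys_da] at hnda)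
    have hnft : ft.keys.Nodup := by
      rw [hft]; exact pv_nodup_keys_filter dt.items _ (by rwa [hkeys_dt] at hndt)
    have hga : ∀ k, fa.get? k = (da.get? k).filter (fun v => v.1 == "Insertion") := by
      intro k; rw [hfa]
      exact pv_get?_mk_filter da.items (fun v => v.1 == "Insertion")
        (by rwa [hkeys_da] at hnda) k
    have hgt : ∀ k, ft.get? k = (dt.get? k).filter (fun v => v.1 == "Insertion") := by
      intro k; rw [hft]
      exact pv_get?_mk_filter dt.items (fun v => v.1 == "Insertion")
        (by rwa [hkeys_dt] at hndt) k
    have hcov_fa : ∀ k, k ∈ fa.keys →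
        k ∈ PySem.Set.union (PySem.Set.ofList da.keys) dt.keys := by
      intro k hk
      refine (PySem.Set.mem_union _ _ k).mpr (Or.inl ((PySem.Set.mem_ofList _ _).mpr ?_))
      rw [hkeys_da]
      have h' : k ∈ (da.items.filter (fun kv => kv.2.1 == "Insertion")).map Prod.fst := hk
      exact List.Sublist.mem h' (List.Sublist.map Prod.fst List.filter_sublist)
    have hcov_ft : ∀ k, k ∈ ft.keys →
        k ∈ PySem.Set.union (PySem.Set.ofList da.keys) dt.keys := by
      intro k hk
      refine (PySem.Set.mem_union _ _ k).mpr (Or.inr ?_)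
      rw [hkeys_dt]
      have h' : k ∈ (dt.items.filter (fun kv => kv.2.1 == "Insertion")).map Prod.fst := hk
      exact List.Sublist.mem h' (List.Sublist.map Prod.fst List.filter_sublist)
    have hbody : (fun (score idx : Int) =>
        match (match da.get? idx with
               | some v => if v.1 ≠ "Insertion" then none else some v
               | none => none),
              (match dt.get? idx with
               | some v => if v.1 ≠ "Insertion" then none else some v
               | none => none) with
        | some a, some t => if a = t then score + 1 else score - 1
        | none, none => score
        | _, _ => score - 1)
      = (fun (score idx : Int) =>
        match fa.get? idx, ft.get? idx with
        | some a, some t => if a = t then score + 1 else score - 1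
        | none, none => score
        | _, _ => score - 1) := by
      funext s k
      rw [pv_transform_eq_filter (da.get? k), pv_transform_eq_filter (dt.get? k),
        ← hga k, ← hgt k]
    rw [hbody]
    exact (pv_core fa ft hnfa hnft _
      (PySem.Set.nodup_union _ _ (PySem.Set.nodup_ofList _))
      hcov_fa hcov_ft)
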